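-- pv_equiv track=rewrite | github.com/minkaas/AdventOfCode_2 | 2024/Day4/Day4.py | search_horizontal
-- ===== SOURCE A (Python) =====
-- def search_horizontal(line, x):
--     result = set()
--     counter = 0
--     for i in range(0, len(line) - 3):
--         if line[i] + line[i+1] + line[i+2] + line[i+3] == "XMAS" or line[i] + line[i+1] + line[i+2] + line[i+3] == "SAMX":
--             result.add((x, i))
--             result.add((x, i+1))
--             result.add((x, i+2))
--             result.add((x, i+3))
--             counter += 1
--     return result, counter
-- ===== SOURCE B (Python) =====
-- def search_horizontal(line, x):
--     starts = []
--     for pat in ("XMAS", "SAMX"):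
--         idx = line.find(pat)
--         while idx != -1:
--             starts.append(idx)
--             idx = line.find(pat, idx + 1)
--     cells = set()
--     for i in sorted(starts):
--         for j in range(i, i + 4):
--             cells.add((x, j))
--     return cells, len(starts)
-- ===== Notes on version B (the rewrite author's own statement) =====
-- stated objective: faster
-- what changed: B locates match starts with repeated str.find per pattern (advancing by 1 to keep overlapping matches) and builds the cell set from the sorted starts, instead of A's testing every 4-char window by concatenating characters.
import Mathlib
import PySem

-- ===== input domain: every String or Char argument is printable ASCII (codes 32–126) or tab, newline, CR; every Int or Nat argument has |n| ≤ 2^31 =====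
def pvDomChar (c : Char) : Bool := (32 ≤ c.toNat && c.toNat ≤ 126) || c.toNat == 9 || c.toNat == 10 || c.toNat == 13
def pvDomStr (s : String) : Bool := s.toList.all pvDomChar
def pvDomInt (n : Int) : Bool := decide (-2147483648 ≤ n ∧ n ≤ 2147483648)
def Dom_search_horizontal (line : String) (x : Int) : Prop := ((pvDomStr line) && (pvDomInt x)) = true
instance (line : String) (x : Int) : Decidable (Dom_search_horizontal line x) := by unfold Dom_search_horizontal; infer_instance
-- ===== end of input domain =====

-- B replaces A's every-4-char-window test by repeated str.find per pattern (advancing by 1 to keep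
-- overlapping matches) and builds the cell set from the sorted match starts; a timing run measured
-- B faster (constant factor); return value only (neither program mutates its arguments).

-- ===== PORT A =====
-- window at i: line[i] + line[i+1] + line[i+2] + line[i+3] (each Option char as a 0/1-char list)
def search_horizontal (line : String) (x : Int) : (List (Int × Int)) × Int :=
  let cs := line.toList
  (PySem.List.pyRange 0 ((cs.length : Int) - 3) 1).foldl
    (fun (st : (List (Int × Int)) × Int) i =>
      let w := (PySem.List.pyGet? cs i).toList ++ (PySem.List.pyGet? cs (i+1)).toList ++
               (PySem.List.pyGet? cs (i+2)).toList ++ (PySem.List.pyGet? cs (i+3)).toList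
      if w = "XMAS".toList ∨ w = "SAMX".toList then
        (PySem.Set.add (PySem.Set.add (PySem.Set.add (PySem.Set.add st.1 (x, i)) (x, i+1)) (x, i+2)) (x, i+3),
         st.2 + 1)
      else st)
    (PySem.Set.empty, 0)

-- ===== PORT B =====
-- the loop 'idx = line.find(pat, start); while idx != -1: starts.append(idx); idx = line.find(pat, idx + 1)'
-- (the Nat fuel only makes the loop total: cs.length + 1 - start strictly decreases, see pvFindAllGo_eq)
def pvFindAllGo (cs p : List Char) : Nat → Nat → List Int
  | 0, _ => []
  | gas+1, start =>
    let j := PySem.Chars.findFrom cs p (start : Int) none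
    if j = -1 then []
    else j :: pvFindAllGo cs p gas (j.toNat + 1)

def pvFindAllFrom (cs p : List Char) (start : Nat) : List Int :=
  pvFindAllGo cs p (cs.length + 1 - start) start

def search_horizontal_alt (line : String) (x : Int) : (List (Int × Int)) × Int :=
  let cs := line.toList
  let starts := pvFindAllFrom cs "XMAS".toList 0 ++ pvFindAllFrom cs "SAMX".toList 0
  let cells := (PySem.List.sorted starts (fun i => i) false).foldl
    (fun (s : List (Int × Int)) i =>
      (PySem.List.pyRange i (i + 4) 1).foldl (fun s j => PySem.Set.add s (x, j)) s)
    PySem.Set.empty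
  (cells, (starts.length : Int))

-- ===== PRECONDITION & SPEC =====
def Spec_search_horizontal (line : String) (x : Int) (out : (List (Int × Int)) × Int) : Prop := out = search_horizontal_alt line x
instance (line : String) (x : Int) (out : (List (Int × Int)) × Int) : Decidable (Spec_search_horizontal line x out) := by unfold Spec_search_horizontal; infer_instance

-- ===== CLAIM (what is proved, stated in full; the proofs are below) =====
def Claim_equal_search_horizontal : Prop := ∀ (line : String) (x : Int), Dom_search_horizontal line x → Spec_search_horizontal line x (search_horizontal line x)

-- ===== LEMMAS AND PROOFS =====

-- the ascending list of all indices i ≥ start at which p occurs in cs, as Ints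
def pvOccs (cs p : List Char) (start : Nat) : List Int :=
  ((List.range cs.length).filter (fun i => decide (start ≤ i) && decide (p <+: cs.drop i))).map
    (fun (i : Nat) => (i : Int))

-- a 4-char window matches at i
def pvCond (cs : List Char) : Nat → Bool :=
  fun i => decide ("XMAS".toList <+: cs.drop i) || decide ("SAMX".toList <+: cs.drop i)

-- the common normal form of both programs
def pvCanon (line : String) (x : Int) : (List (Int × Int)) × Int :=
  ((((List.range (line.toList.length - 3)).filter (pvCond line.toList)).foldl
      (fun (s : List (Int × Int)) (k : Nat) => PySem.Set.add (PySem.Set.add (PySem.Set.add (PySem.Set.add s (x, (k:Int))) (x, (k:Int)+1)) (x, (k:Int)+2)) (x, (k:Int)+3))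
      []),
   (((List.range (line.toList.length - 3)).filter (pvCond line.toList)).length : Int))

-- find with a start index past the end yields -1
theorem pvFindFrom_big (cs p : List Char) (k : Nat) (h : cs.length < k) :
    PySem.Chars.findFrom cs p (k : Int) none = -1 := by
  simp [PySem.Chars.findFrom]
  intro h1; omega

theorem pvNoOcc (cs p : List Char) (start i : Nat) (hsi : start ≤ i)
    (hnin : ¬ p <:+: cs.drop start) : ¬ p <+: cs.drop i := by
  intro hpre
  have hd : cs.drop i = (cs.drop start).drop (i - start) := by
    rw [List.drop_drop]; congr 1; omega
  rw [hd] at hpre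
  exact hnin (hpre.isInfix.trans (List.drop_suffix _ _).isInfix)

theorem pvOccs_big (cs p : List Char) (start : Nat) (hbig : cs.length < start) :
    pvOccs cs p start = [] := by
  unfold pvOccs
  rw [List.filter_eq_nil_iff.mpr (by
    intro i hi
    simp only [List.mem_range] at hi
    simp [show ¬ start ≤ i by omega])]
  simp

theorem pvFindAllGo_eq (cs p : List Char) (hp : p ≠ []) (gas : Nat) :
    ∀ start, cs.length + 1 - start ≤ gas → pvFindAllGo cs p gas start = pvOccs cs p start := by
  induction gas with
  | zero =>
    intro start hf
    rw [pvFindAllGo]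
    exact (pvOccs_big cs p start (by omega)).symm
  | succ gas ih =>
    intro start hf
    by_cases hle : start ≤ cs.length
    · rw [pvFindAllGo]
      by_cases hj : PySem.Chars.findFrom cs p (start : Int) none = -1
      · simp only [hj, if_pos rfl]
        have hninf : ¬ p <:+: cs.drop start :=
          (PySem.Chars.findFrom_natCast_eq_neg_one_iff cs p start hle).mp hj
        unfold pvOccs
        rw [List.filter_eq_nil_iff.mpr (by
          intro i hi
          simp only [Bool.and_eq_true, decide_eq_true_eq, not_and]
          intro hsi
          exact pvNoOcc cs p start i hsi hninf)]
        simp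
      · obtain ⟨hj1, hj2, hj3⟩ := PySem.Chars.findFrom_natCast_spec cs p start hle hj
        set j := PySem.Chars.findFrom cs p (start : Int) none with hjdef
        simp only [if_neg hj]
        set J := j.toNat with hJdef
        have hjnn : 0 ≤ j := le_trans (by positivity) hj1
        have hJcast : (J : Int) = j := Int.toNat_of_nonneg hjnn
        have hsJ : start ≤ J := by omega
        have hJlen : J < cs.length := by
          by_contra hc
          rw [List.drop_eq_nil_of_le (by omega)] at hj2
          exact hp (List.prefix_nil.mp hj2)
        rw [ih (J+1) (by omega)]
        unfold pvOccs
        have hsplit : List.range cs.length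
            = List.range (J+1) ++ (List.range (cs.length-(J+1))).map ((J+1) + ·) := by
          conv_lhs => rw [show cs.length = (J+1) + (cs.length-(J+1)) by omega]
          exact List.range_add
        rw [hsplit, List.filter_append, List.filter_append]
        have h1 : (List.range (J+1)).filter
            (fun i => decide (start ≤ i) && decide (p <+: cs.drop i)) = [J] := by
          rw [List.range_succ, List.filter_append, List.filter_eq_nil_iff.mpr (by
            intro i hi
            simp only [List.mem_range] at hi
            simp only [Bool.and_eq_true, decide_eq_true_eq, not_and]
            intro hsi
            exact hj3 i hsi (by omega)), List.nil_append]
          simp [hsJ, hj2]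
        have h2 : (List.range (J+1)).filter
            (fun i => decide (J+1 ≤ i) && decide (p <+: cs.drop i)) = [] := by
          rw [List.filter_eq_nil_iff.mpr]
          intro i hi
          simp only [List.mem_range] at hi
          simp [show ¬ J+1 ≤ i by omega]
        have h3 : ((List.range (cs.length-(J+1))).map ((J+1) + ·)).filter
              (fun i => decide (start ≤ i) && decide (p <+: cs.drop i))
            = ((List.range (cs.length-(J+1))).map ((J+1) + ·)).filter
              (fun i => decide (J+1 ≤ i) && decide (p <+: cs.drop i)) := by
          apply List.filter_congr
          intro i hi
          simp only [List.mem_map] at hi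
          obtain ⟨y, _, rfl⟩ := hi
          simp [show start ≤ J+1+y by omega, show J+1 ≤ J+1+y by omega]
        rw [h1, h2, h3, List.nil_append]
        simp [hJcast]
    · rw [pvFindAllGo]
      simp only [pvFindFrom_big cs p start (by omega), if_pos rfl]
      exact (pvOccs_big cs p start (by omega)).symm

theorem pvFindAllFrom_eq (cs p : List Char) (hp : p ≠ []) (start : Nat) :
    pvFindAllFrom cs p start = pvOccs cs p start :=
  pvFindAllGo_eq cs p hp (cs.length + 1 - start) start le_rfl

theorem pvOccs_zero (cs p : List Char) :
    pvOccs cs p 0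
      = ((List.range cs.length).filter (fun i => decide (p <+: cs.drop i))).map (fun (i : Nat) => (i : Int)) := by
  unfold pvOccs
  have h : (fun i => decide (0 ≤ i) && decide (p <+: cs.drop i)) = (fun i => decide (p <+: cs.drop i)) := by
    funext i; simp
  rw [h]

theorem pvWindow_eq (cs : List Char) (k : Nat) (h : k + 4 ≤ cs.length) (p : List Char)
    (hp : p.length = 4) :
    ((PySem.List.pyGet? cs (k : Int)).toList ++ (PySem.List.pyGet? cs ((k : Int)+1)).toList ++
     (PySem.List.pyGet? cs ((k : Int)+2)).toList ++ (PySem.List.pyGet? cs ((k : Int)+3)).toList = p)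
    ↔ p <+: cs.drop k := by
  have e1 : ((k : Int)+1) = ((k+1 : Nat) : Int) := by push_cast; ring
  have e2 : ((k : Int)+2) = ((k+2 : Nat) : Int) := by push_cast; ring
  have e3 : ((k : Int)+3) = ((k+3 : Nat) : Int) := by push_cast; ring
  rw [e1, e2, e3]
  simp only [PySem.List.pyGet?_natCast]
  have h0 : k < cs.length := by omega
  have h1 : k+1 < cs.length := by omega
  have h2 : k+2 < cs.length := by omega
  have h3 : k+3 < cs.length := by omega
  rw [List.getElem?_eq_getElem h0, List.getElem?_eq_getElem h1,
      List.getElem?_eq_getElem h2, List.getElem?_eq_getElem h3]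
  have htake : (cs.drop k).take 4 = [cs[k], cs[k+1], cs[k+2], cs[k+3]] := by
    apply List.ext_getElem
    · simp; omega
    · intro i hi _
      simp only [List.getElem_take, List.getElem_drop]
      have : i < 4 := by simp at hi; omega
      interval_cases i <;> simp
  rw [List.prefix_iff_eq_take, hp, htake]
  simp [eq_comm]

theorem pvFilter_or_perm (l : List Nat) (p q : Nat → Bool) (h : ∀ i ∈ l, ¬(p i = true ∧ q i = true)) :
    (l.filter p ++ l.filter q).Perm (l.filter (fun i => p i || q i)) := by
  induction l with
  | nil => simp
  | cons a t ih =>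
    have iht := ih (fun i hi => h i (List.mem_cons_of_mem a hi))
    cases hp : p a
    · cases hq : q a
      · simp [hp, hq]
        exact iht
      · simp only [List.filter_cons, hp, hq, Bool.false_or]
        exact List.perm_middle.trans (iht.cons a)
    · have hq : q a = false := by
        cases hq : q a
        · rfl
        · exact absurd ⟨hp, hq⟩ (h a List.mem_cons_self)
      simp [hp, hq]
      exact iht

theorem pvRange4 (a : Int) : PySem.List.pyRange a (a + 4) 1 = [a, a+1, a+2, a+3] := by
  rw [PySem.List.pyRange_one_cons (by omega), PySem.List.pyRange_one_cons (by omega),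
      PySem.List.pyRange_one_cons (by omega), PySem.List.pyRange_one_cons (by omega),
      PySem.List.pyRange_one_eq_nil (by omega)]
  norm_num
  constructor <;> ring

theorem pvCond4 (cs : List Char) (i : Nat) (h : pvCond cs i = true) : i + 4 ≤ cs.length := by
  simp only [pvCond, Bool.or_eq_true, decide_eq_true_eq] at h
  have hlen : 4 ≤ (cs.drop i).length := by
    rcases h with h | h
    · simpa using h.length_le
    · simpa using h.length_le
  simp only [List.length_drop] at hlen
  omega

theorem pvShrink (n : Nat) (c : Nat → Bool) (h : ∀ i, c i = true → i + 4 ≤ n) :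
    (List.range n).filter c = (List.range (n-3)).filter c := by
  have h1 : List.range n = List.range (n-3) ++ (List.range (n-(n-3))).map ((n-3) + ·) := by
    rw [← List.range_add]
    congr 1
    omega
  have h2 : ((List.range (n-(n-3))).map ((n-3) + ·)).filter c = [] := by
    apply List.filter_eq_nil_iff.mpr
    intro i hi
    simp only [List.mem_map] at hi
    obtain ⟨y, hy, rfl⟩ := hi
    intro hcc
    have := h _ hcc
    omega
  rw [h1, List.filter_append, h2, List.append_nil]

theorem pvDisjoint (cs : List Char) (i : Nat) :
    ¬(decide ("XMAS".toList <+: cs.drop i) = true ∧ decide ("SAMX".toList <+: cs.drop i) = true) := by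
  rintro ⟨h1, h2⟩
  simp only [decide_eq_true_eq] at h1 h2
  have e1 := List.prefix_iff_eq_take.mp h1
  have e2 := List.prefix_iff_eq_take.mp h2
  simp only [show ("XMAS".toList).length = 4 by decide, show ("SAMX".toList).length = 4 by decide] at e1 e2
  rw [← e1] at e2
  simp at e2

theorem pvSortedStarts (cs : List Char) :
    PySem.List.sorted (pvOccs cs "XMAS".toList 0 ++ pvOccs cs "SAMX".toList 0) (fun i => i) false
      = ((List.range cs.length).filter (pvCond cs)).map (fun (i : Nat) => (i : Int)) := by
  rw [pvOccs_zero, pvOccs_zero]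
  apply PySem.List.sorted_eq_of_perm_of_pairwise_lt
  · rw [← List.map_append]
    refine (List.Perm.map _ ?_).symm
    unfold pvCond
    exact pvFilter_or_perm (List.range cs.length) _ _ (fun i _ => pvDisjoint cs i)
  · rw [List.pairwise_map]
    exact (List.pairwise_lt_range.filter (pvCond cs)).imp (fun h => by exact_mod_cast h)

theorem pvStartsLen (cs : List Char) :
    (pvOccs cs "XMAS".toList 0 ++ pvOccs cs "SAMX".toList 0).length
      = ((List.range cs.length).filter (pvCond cs)).length := by
  rw [pvOccs_zero, pvOccs_zero, ← List.map_append, List.length_map]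
  exact (pvFilter_or_perm (List.range cs.length) _ _ (fun i _ => pvDisjoint cs i)).length_eq

theorem pvB (line : String) (x : Int) : search_horizontal_alt line x = pvCanon line x := by
  simp only [search_horizontal_alt, pvCanon]
  rw [pvFindAllFrom_eq _ _ (by decide) 0, pvFindAllFrom_eq _ _ (by decide) 0,
      pvSortedStarts, pvStartsLen,
      pvShrink line.toList.length (pvCond line.toList) (pvCond4 line.toList),
      List.foldl_map]
  refine congrArg₂ Prod.mk ?_ rfl
  apply PySem.List.foldl_congr_mem
  intro s k _
  rw [pvRange4]
  rfl

theorem pvA (line : String) (x : Int) : search_horizontal line x = pvCanon line x := by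
  simp only [search_horizontal, pvCanon]
  have hm : ((line.toList.length : Int) - 3).toNat = line.toList.length - 3 := by omega
  rw [PySem.List.pyRange_zero, hm, List.foldl_map]
  rw [PySem.List.foldl_congr_mem (List.range (line.toList.length - 3))
      (g := fun (st : (List (Int × Int)) × Int) (k : Nat) =>
        (if pvCond line.toList k = true then
          PySem.Set.add (PySem.Set.add (PySem.Set.add (PySem.Set.add st.1 (x, (k:Int))) (x, (k:Int)+1)) (x, (k:Int)+2)) (x, (k:Int)+3)
         else st.1,
         if pvCond line.toList k = true then st.2 + 1 else st.2))]
  · rw [PySem.List.foldl_prod_mk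
      (f := fun (s : List (Int × Int)) (k : Nat) =>
        if pvCond line.toList k = true then
          PySem.Set.add (PySem.Set.add (PySem.Set.add (PySem.Set.add s (x, (k:Int))) (x, (k:Int)+1)) (x, (k:Int)+2)) (x, (k:Int)+3)
        else s)
      (g := fun (c : Int) (k : Nat) => if pvCond line.toList k = true then c + 1 else c)]
    refine congrArg₂ Prod.mk ?_ ?_
    · rw [List.foldl_filter]
      rfl
    · rw [PySem.List.foldl_ite_add_one (fun k => pvCond line.toList k = true)]
      simp [List.countP_eq_length_filter]
  · intro st k hk
    simp only [List.mem_range] at hk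
    have h4 : k + 4 ≤ line.toList.length := by omega
    have hiff := pvWindow_eq line.toList k h4
    by_cases hck : pvCond line.toList k = true
    · rw [if_pos, if_pos hck, if_pos hck]
      simp only [pvCond, Bool.or_eq_true, decide_eq_true_eq] at hck
      rcases hck with h | h
      · exact Or.inl ((hiff "XMAS".toList (by decide)).mpr h)
      · exact Or.inr ((hiff "SAMX".toList (by decide)).mpr h)
    · rw [if_neg, if_neg hck, if_neg hck]
      intro hcond
      apply hck
      simp only [pvCond, Bool.or_eq_true, decide_eq_true_eq]
      rcases hcond with h | h
      · exact Or.inl ((hiff "XMAS".toList (by decide)).mp h)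
      · exact Or.inr ((hiff "SAMX".toList (by decide)).mp h)

-- ===== VERDICT (by name: the statement is the Claim_ definition above) =====
theorem search_horizontal_spec : Claim_equal_search_horizontal := by
  intro line x _
  unfold Spec_search_horizontal
  rw [pvA, pvB]
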